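-- pv_equiv track=rewrite | github.com/RotemAmsalem/mini-projects | INTRO-ex5/crossword.py | r_direction
-- ===== SOURCE A (Python) =====
-- def concat_list(str_lst):
--     """ This function receives a list of strings, and return the
--     concatenation of the list's parts as one string."""
--     length = len(str_lst)  # the list can be an empty list.
--     one_str = ''
--     for i in range(length):
--         one_str = one_str + str_lst[i]
--     return one_str
--
-- def check_directions(lst1, lst2, words):
--     """ This function receives two lists. The first one is matrix list and the
--     second is an empty list which in the end will contain the words
--     according to each searching words direction."""
--     for j in range(len(words)):
--         for i in range(len(lst1)):
--             if words[j] in lst1[i]: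
--                 for p in range(len(lst1[i])-len(words[j])+1):
--                     check = lst1[i][p:p+len(words[j])]
--                     if check == words[j]:
--                         lst2.append(words[j])
--     return lst2
--
-- def r_direction(matrix_lst, words):
--     """ This function receives the matrix list and returns the words that are
--     found in the right direction. """
--     right_lst = []
--     word_right_lst = []
--     for i in range(len(matrix_lst)):
--         for j in range(len(matrix_lst[0])):
--             row = matrix_lst[i]
--             right_lst.append(row[j].lower())
--         right_lst.append(' ')
--     column_right_lst = str(concat_list(right_lst)).split()
--     return check_directions(column_right_lst, word_right_lst, words)
-- ===== SOURCE B (Python) =====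
-- def r_direction(matrix_lst, words):
--     """ This function receives the matrix list and returns the words that are
--     found in the right direction. """
--     if not matrix_lst:
--         return []
--     width = len(matrix_lst[0])
--     tokens = []
--     for row in matrix_lst:
--         tokens.extend(row[:width].lower().split())
--     # Index the text instead of scanning per word: one sweep over every token
--     # position, probing the word SET once per distinct word length; collect all
--     # matched substrings, then tally each requested word.
--     wordset = set(words)
--     lengths = sorted({len(w) for w in words})
--     matches = []
--     for t in tokens:
--         for i in range(len(t) + 1):
--             for L in lengths:
--                 sub = t[i:i + L]
--                 if len(sub) == L and sub in wordset:
--                     matches.append(sub)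
--     return [w for w in words for _ in range(matches.count(w))]
-- ===== Notes on version B (the rewrite author's own statement) =====
-- stated objective: faster
-- what changed: B inverts the search: instead of A's per-word scan over the flattened grid (for each word, for each token, compare a slice at every position), B sweeps the token text once per distinct word length, probing a hash set of the words at each position to collect all matches, then tallies each requested word from that match list; the per-word rescans of the text disappear. Pre_ excludes exactly the inputs where A raises IndexError (a non-empty matrix whose first row is longer than some other row).
import Mathlib
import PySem

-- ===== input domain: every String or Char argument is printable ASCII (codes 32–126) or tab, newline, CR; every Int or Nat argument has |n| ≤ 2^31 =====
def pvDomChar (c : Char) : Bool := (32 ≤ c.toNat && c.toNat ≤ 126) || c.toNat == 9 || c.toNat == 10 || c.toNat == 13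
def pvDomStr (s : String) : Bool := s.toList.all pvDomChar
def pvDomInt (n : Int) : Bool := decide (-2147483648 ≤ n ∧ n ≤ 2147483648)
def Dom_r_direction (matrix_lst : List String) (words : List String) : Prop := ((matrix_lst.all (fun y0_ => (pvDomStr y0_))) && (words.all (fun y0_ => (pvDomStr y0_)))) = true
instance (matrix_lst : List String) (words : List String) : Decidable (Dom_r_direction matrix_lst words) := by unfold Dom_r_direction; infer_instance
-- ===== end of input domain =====

-- B inverts the search: one sweep over the token text probing a set of the words
-- per distinct word length, instead of A's per-word positional scan (objective: alternative).

-- ===== PORT A =====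
-- concat_list(str_lst)
def concatA (str_lst : List (List Char)) : List Char :=
  (PySem.List.pyRange 0 (str_lst.length : Int)).foldl
    (fun one_str i => one_str ++ PySem.List.pyGetD str_lst i []) []

-- check_directions(lst1, lst2, words)
def checkA (lst1 : List (List Char)) (lst2 : List String) (words : List String) : List String :=
  (PySem.List.pyRange 0 (words.length : Int)).foldl (fun acc j =>
    (PySem.List.pyRange 0 (lst1.length : Int)).foldl (fun acc2 i =>
      let wj := PySem.List.pyGetD words j ""
      let ti := PySem.List.pyGetD lst1 i []
      if PySem.Chars.isIn wj.toList ti then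
        (PySem.List.pyRange 0 ((ti.length : Int) - (wj.toList.length : Int) + 1)).foldl
          (fun acc3 p =>
            if PySem.List.slice ti (some p) (some (p + (wj.toList.length : Int))) = wj.toList
            then acc3 ++ [wj] else acc3) acc2
      else acc2) acc) lst2

def r_direction (matrix_lst : List String) (words : List String) : List String :=
  let right_lst : List (List Char) :=
    (PySem.List.pyRange 0 (matrix_lst.length : Int)).foldl (fun acc i =>
      ((PySem.List.pyRange 0 ((PySem.List.pyGetD matrix_lst 0 "").toList.length : Int)).foldl
        (fun acc2 j =>
          let row := (PySem.List.pyGetD matrix_lst i "").toList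
          acc2 ++ [PySem.Chars.lower [PySem.List.pyGetD row j ' ']]) acc)
      ++ [[' ']]) []
  let column_right_lst := PySem.Chars.split₀ (concatA right_lst)
  checkA column_right_lst [] words

-- ===== PORT B =====
def r_direction_alt (matrix_lst : List String) (words : List String) : List String :=
  if matrix_lst = [] then []
  else
    let width := (PySem.List.pyGetD matrix_lst 0 "").toList.length
    let tokens := matrix_lst.foldl (fun toks row =>
      toks ++ PySem.Chars.split₀
        (PySem.Chars.lower (PySem.List.slice row.toList none (some (width : Int))))) []
    -- wordset = set(words); lengths = sorted({len(w) for w in words})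
    let wordset : PySem.Set (List Char) := PySem.Set.ofList (words.map String.toList)
    let lengths : List Int :=
      PySem.List.sorted (PySem.Set.ofList (words.map (fun w => ((w.toList.length : Nat) : Int)))) (fun x => x) false
    -- one sweep over every token position, probing the word set per distinct length
    let found : List (List Char) := tokens.foldl (fun ms t =>
      (PySem.List.pyRange 0 ((t.length : Int) + 1)).foldl (fun ms2 i =>
        lengths.foldl (fun ms3 L =>
          let sub := PySem.List.slice t (some i) (some (i + L))
          if ((sub.length : Int) = L ∧ PySem.Set.contains wordset sub) then ms3 ++ [sub] else ms3)
          ms2) ms) []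
    words.flatMap (fun w =>
      (PySem.List.pyRange 0 ((found.count w.toList : Nat) : Int)).map (fun _ => w))

-- ===== PRECONDITION & SPEC =====
-- Pre_ excludes exactly the inputs on which A raises IndexError: a non-empty matrix
-- whose first row is longer than some other row (A indexes every row up to len(matrix_lst[0])).
def Pre_r_direction (matrix_lst : List String) (words : List String) : Prop :=
  ∀ row ∈ matrix_lst, (matrix_lst.headD "").toList.length ≤ row.toList.length
instance (matrix_lst : List String) (words : List String) : Decidable (Pre_r_direction matrix_lst words) := by unfold Pre_r_direction; infer_instance
def pvWitness_r_direction : List String × List String := (["ab", "cd"], ["a"])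

def Spec_r_direction (matrix_lst : List String) (words : List String) (out : List String) : Prop := out = r_direction_alt matrix_lst words
instance (matrix_lst : List String) (words : List String) (out : List String) : Decidable (Spec_r_direction matrix_lst words out) := by unfold Spec_r_direction; infer_instance

-- ===== CLAIM (what is proved, stated in full; the proofs are below) =====
def Claim_equal_r_direction : Prop := ∀ (matrix_lst : List String) (words : List String), Dom_r_direction matrix_lst words → Pre_r_direction matrix_lst words → Spec_r_direction matrix_lst words (r_direction matrix_lst words)

-- ===== LEMMAS AND PROOFS =====

-- number of positions p (0 ≤ p ≤ |t|, k ≤ p) at which w occurs (as a prefix of t.drop p)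
def nc (t w : List Char) (k : Nat) : Nat :=
  (List.range (t.length + 1)).countP (fun p => decide (k ≤ p ∧ w <+: t.drop p))

theorem prefix_drop_infix {t w : List Char} {p k : Nat}
    (h1 : w <+: t.drop p) (hk : k ≤ p) : w <:+: t.drop k := by
  have hd : t.drop p = (t.drop k).drop (p - k) := by
    rw [List.drop_drop]; congr 1; omega
  rw [hd] at h1
  exact h1.isInfix.trans (List.drop_suffix _ _).isInfix

theorem nc_eq_zero_of_not_infix (t w : List Char) (k : Nat)
    (h : ¬ w <:+: t.drop k) : nc t w k = 0 := by
  unfold nc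
  rw [List.countP_eq_zero]
  intro p _
  simp only [decide_eq_true_eq, not_and]
  intro hkp hpre
  exact h (prefix_drop_infix hpre hkp)

-- for i in range(len(xs)): ... xs[i] ...  consumes xs itself (cites PySem.List.foldl_pyRange_pyGetD)
theorem foldl_pyRange_len {α β : Type} (xs : List α) (d : α) (f : β → α → β) (init : β) :
    (PySem.List.pyRange 0 (xs.length : Int)).foldl
      (fun acc j => f acc (PySem.List.pyGetD xs j d)) init = xs.foldl f init := by
  have h : ((xs.length : Nat) : Int) = PySem.List.len xs := rfl
  rw [h, PySem.List.foldl_pyRange_pyGetD xs d f init (by norm_num)]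
  simp

theorem map_getD_range {α : Type} (l : List α) (d : α) (n : Nat) (hn : n ≤ l.length) :
    (List.range n).map (fun j => l.getD j d) = l.take n := by
  apply List.ext_getElem
  · simp; omega
  · intro i h1 h2
    simp only [List.getElem_map, List.getElem_range, List.getElem_take]
    rw [List.getD_eq_getElem l d (by simp at h1; omega)]

theorem go_acc (s : List Char) : ∀ (cur : List Char) (acc : List (List Char)),
    PySem.Chars.split₀.go s cur acc = acc.reverse ++ PySem.Chars.split₀.go s cur [] := by
  induction s with
  | nil =>
    intro cur acc
    simp only [PySem.Chars.split₀.go]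
    by_cases hc : cur.isEmpty <;> simp [hc]
  | cons c rest ih =>
    intro cur acc
    simp only [PySem.Chars.split₀.go]
    by_cases hsp : PySem.Chars.isspace c
    · by_cases hc : cur.isEmpty
      · simp only [hsp, hc, if_true]
        exact ih [] acc
      · simp only [hsp, hc, if_true]
        rw [ih [] (cur.reverse :: acc), ih [] [cur.reverse]]
        simp
    · simp only [hsp]
      exact ih (c :: cur) acc

theorem go_space (ys : List Char) : ∀ (xs cur : List Char) (acc : List (List Char)),
    PySem.Chars.split₀.go (xs ++ ' ' :: ys) cur acc =
      PySem.Chars.split₀.go xs cur acc ++ PySem.Chars.split₀.go ys [] [] := by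
  intro xs
  induction xs with
  | nil =>
    intro cur acc
    simp only [List.nil_append, PySem.Chars.split₀.go]
    have hsp : PySem.Chars.isspace ' ' = true := rfl
    by_cases hc : cur.isEmpty
    · simp only [hsp, hc, if_true]
      rw [go_acc ys [] acc]
    · simp only [hsp, hc, if_true]
      rw [go_acc ys [] (cur.reverse :: acc)]
      simp
  | cons c xs ih =>
    intro cur acc
    simp only [List.cons_append, PySem.Chars.split₀.go]
    by_cases hsp : PySem.Chars.isspace c
    · by_cases hc : cur.isEmpty <;> simp only [hsp, hc, if_true] <;> exact ih _ _
    · simp only [hsp]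
      exact ih _ _

theorem split₀_append_space (xs ys : List Char) :
    PySem.Chars.split₀ (xs ++ ' ' :: ys) = PySem.Chars.split₀ xs ++ PySem.Chars.split₀ ys := by
  simp only [PySem.Chars.split₀]
  exact go_space ys xs [] []

theorem split_flatMap {α : Type} (g : α → List Char) (l : List α) :
    PySem.Chars.split₀ (l.flatMap (fun r => g r ++ [' '])) =
      l.flatMap (fun r => PySem.Chars.split₀ (g r)) := by
  induction l with
  | nil => rfl
  | cons r rest ih =>
    rw [List.flatMap_cons, List.append_assoc, List.singleton_append,
      split₀_append_space, ih, List.flatMap_cons]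

theorem flatten_flatMap {α β : Type} (g : α → List (List β)) (l : List α) :
    (l.flatMap g).flatten = l.flatMap (fun x => (g x).flatten) := by
  induction l with
  | nil => rfl
  | cons x rest ih => simp [ih]

theorem flatten_map_singleton {α β : Type} (f : α → β) (l : List α) :
    (l.map (fun x => [f x])).flatten = l.map f := by
  induction l with
  | nil => rfl
  | cons x rest ih => simp [ih]

theorem concatA_eq (l : List (List Char)) : concatA l = l.flatten := by
  unfold concatA
  rw [foldl_pyRange_len l [] (fun a x => a ++ x) []]
  rw [PySem.List.foldl_append_eq_flatten]
  simp

theorem checkA_inner (t : List Char) (w : String) (acc : List String) :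
    (PySem.List.pyRange 0 ((t.length : Int) - (w.toList.length : Int) + 1)).foldl
      (fun acc3 p =>
        if PySem.List.slice t (some p) (some (p + (w.toList.length : Int))) = w.toList
        then acc3 ++ [w] else acc3) acc
    = acc ++ List.replicate (nc t w.toList 0) w := by
  by_cases hM : w.toList.length ≤ t.length
  · have h1 : ((t.length : Int) - (w.toList.length : Int) + 1)
        = ((t.length - w.toList.length + 1 : Nat) : Int) := by omega
    rw [h1, PySem.List.pyRange_zero_natCast,
      PySem.List.foldl_append_ite
        (fun p : Int => PySem.List.slice t (some p) (some (p + (w.toList.length : Int))) = w.toList)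
        (fun _ : Int => w)]
    congr 1
    rw [List.map_const', ← List.countP_eq_length_filter, List.countP_map]
    congr 1
    have hcong : (List.range (t.length - w.toList.length + 1)).countP
        ((fun p : Int => decide (PySem.List.slice t (some p) (some (p + (w.toList.length : Int))) = w.toList)) ∘ (fun k : Nat => (k : Int)))
        = (List.range (t.length - w.toList.length + 1)).countP
        (fun p => decide (w.toList <+: t.drop p)) := by
      apply List.countP_congr
      intro p hp
      simp only [List.mem_range] at hp
      simp only [Function.comp_apply]
      have h2 : ((p : Int) + (w.toList.length : Int)) = ((p + w.toList.length : Nat) : Int) := by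
        push_cast; ring
      rw [h2, PySem.List.slice_natCast]
      have h3 : p + w.toList.length - p = w.toList.length := by omega
      rw [h3]
      simp only [decide_eq_true_eq]
      constructor
      · intro he
        rw [← he]
        exact List.take_prefix _ _
      · intro hpre
        rw [List.prefix_iff_eq_take] at hpre
        exact hpre.symm
    rw [hcong]
    unfold nc
    have hrange : List.range (t.length + 1)
        = List.range (t.length - w.toList.length + 1)
          ++ (List.range w.toList.length).map (fun x => t.length - w.toList.length + 1 + x) := by
      rw [← List.range_add]
      congr 1
      omega
    rw [hrange, List.countP_append]
    have hz : ((List.range w.toList.length).map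
        (fun x => t.length - w.toList.length + 1 + x)).countP
        (fun p => decide (0 ≤ p ∧ w.toList <+: t.drop p)) = 0 := by
      rw [List.countP_eq_zero]
      intro p hp
      simp only [List.mem_map, List.mem_range] at hp
      obtain ⟨q, hq, rfl⟩ := hp
      simp only [decide_eq_true_eq, not_and]
      intro _ hpre
      have := hpre.length_le
      rw [List.length_drop] at this
      omega
    rw [hz]
    have hdrop0 : (List.range (t.length - w.toList.length + 1)).countP
        (fun p => decide (0 ≤ p ∧ w.toList <+: t.drop p))
        = (List.range (t.length - w.toList.length + 1)).countP
        (fun p => decide (w.toList <+: t.drop p)) := by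
      apply List.countP_congr
      intro p _
      simp
    rw [hdrop0]
    omega
  · rw [Nat.not_le] at hM
    have hemp : PySem.List.pyRange 0 ((t.length : Int) - (w.toList.length : Int) + 1) = [] := by
      apply List.eq_nil_iff_forall_not_mem.mpr
      intro x hx
      rw [PySem.List.mem_pyRange_one] at hx
      omega
    rw [hemp, List.foldl_nil]
    have hz : nc t w.toList 0 = 0 := by
      unfold nc
      rw [List.countP_eq_zero]
      intro p hp
      simp only [List.mem_range] at hp
      simp only [decide_eq_true_eq, not_and]
      intro _ hpre
      have := hpre.length_le
      rw [List.length_drop] at this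
      omega
    rw [hz]
    simp

theorem checkA_token (w : String) (t : List Char) (acc : List String) :
    (if PySem.Chars.isIn w.toList t then
      (PySem.List.pyRange 0 ((t.length : Int) - (w.toList.length : Int) + 1)).foldl
        (fun acc3 p =>
          if PySem.List.slice t (some p) (some (p + (w.toList.length : Int))) = w.toList
          then acc3 ++ [w] else acc3) acc
     else acc)
    = acc ++ List.replicate (nc t w.toList 0) w := by
  by_cases hin : PySem.Chars.isIn w.toList t
  · rw [if_pos hin, checkA_inner]
  · rw [if_neg hin]
    have hnot : ¬ w.toList <:+: t := by
      rw [← PySem.Chars.isIn_iff_infix]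
      simpa using hin
    have hz : nc t w.toList 0 = 0 := by
      have : t.drop 0 = t := List.drop_zero
      exact nc_eq_zero_of_not_infix t w.toList 0 (by rw [this]; exact hnot)
    rw [hz]
    simp

theorem flatMap_replicate_sum {α β : Type} (g : α → Nat) (w : β) (l : List α) :
    l.flatMap (fun t => List.replicate (g t) w) = List.replicate ((l.map g).sum) w := by
  induction l with
  | nil => rfl
  | cons t rest ih =>
    rw [List.flatMap_cons, List.map_cons, List.sum_cons, List.replicate_add, ih]

theorem checkA_word (lst1 : List (List Char)) (w : String) (acc : List String) :
    (PySem.List.pyRange 0 (lst1.length : Int)).foldl (fun acc2 i =>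
        if PySem.Chars.isIn w.toList (PySem.List.pyGetD lst1 i []) then
          (PySem.List.pyRange 0 (((PySem.List.pyGetD lst1 i []).length : Int) - (w.toList.length : Int) + 1)).foldl
            (fun acc3 p =>
              if PySem.List.slice (PySem.List.pyGetD lst1 i []) (some p) (some (p + (w.toList.length : Int))) = w.toList
              then acc3 ++ [w] else acc3) acc2
        else acc2) acc
    = acc ++ List.replicate ((lst1.map (fun t => nc t w.toList 0)).sum) w := by
  rw [foldl_pyRange_len lst1 []
    (fun acc2 ti =>
      if PySem.Chars.isIn w.toList ti then
        (PySem.List.pyRange 0 ((ti.length : Int) - (w.toList.length : Int) + 1)).foldl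
          (fun acc3 p =>
            if PySem.List.slice ti (some p) (some (p + (w.toList.length : Int))) = w.toList
            then acc3 ++ [w] else acc3) acc2
      else acc2) acc]
  simp only [checkA_token w]
  rw [PySem.List.foldl_append_eq_flatMap (g := fun t => List.replicate (nc t w.toList 0) w),
    flatMap_replicate_sum]

theorem checkA_eq (lst1 : List (List Char)) (words init : List String) :
    checkA lst1 init words = init ++ words.flatMap
      (fun w => List.replicate ((lst1.map (fun t => nc t w.toList 0)).sum) w) := by
  simp only [checkA]
  rw [foldl_pyRange_len words ""
    (fun acc wj =>
      (PySem.List.pyRange 0 (lst1.length : Int)).foldl (fun acc2 i =>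
        if PySem.Chars.isIn wj.toList (PySem.List.pyGetD lst1 i []) then
          (PySem.List.pyRange 0 (((PySem.List.pyGetD lst1 i []).length : Int) - (wj.toList.length : Int) + 1)).foldl
            (fun acc3 p =>
              if PySem.List.slice (PySem.List.pyGetD lst1 i []) (some p) (some (p + (wj.toList.length : Int))) = wj.toList
              then acc3 ++ [wj] else acc3) acc2
        else acc2) acc) init]
  simp only [checkA_word]
  simp only [PySem.List.foldl_append_eq_flatMap]

theorem rowA (n0 : Nat) (row : String) (hrow : n0 ≤ row.toList.length) (acc : List (List Char)) :
    ((PySem.List.pyRange 0 (n0 : Int)).foldl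
        (fun acc2 j => acc2 ++ [PySem.Chars.lower [PySem.List.pyGetD row.toList j ' ']]) acc) ++ [[' ']]
    = acc ++ (((row.toList.take n0).map (fun c => [PySem.Chars.lowerChar c])) ++ [[' ']]) := by
  rw [PySem.List.pyRange_zero_natCast, List.foldl_map, PySem.List.foldl_append_singleton_eq_map]
  simp only [PySem.List.pyGetD_natCast, PySem.Chars.lower, List.map_cons, List.map_nil]
  rw [show (fun j => [PySem.Chars.lowerChar (row.toList.getD j ' ')])
        = (fun c => [PySem.Chars.lowerChar c]) ∘ (fun j => row.toList.getD j ' ') from rfl,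
    ← List.map_map, map_getD_range row.toList ' ' n0 hrow, List.append_assoc]

theorem mainA (r0 : String) (rest words : List String)
    (hpre : ∀ row ∈ r0 :: rest, r0.toList.length ≤ row.toList.length) :
    r_direction (r0 :: rest) words =
      words.flatMap (fun w => List.replicate
        ((((r0 :: rest).flatMap (fun row =>
            PySem.Chars.split₀ ((row.toList.take r0.toList.length).map PySem.Chars.lowerChar))).map
          (fun t => nc t w.toList 0)).sum) w) := by
  simp only [r_direction]
  have hw : PySem.List.pyGetD (r0 :: rest) 0 "" = r0 := by
    simp [PySem.List.pyGetD_ofNat']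
  rw [hw]
  rw [foldl_pyRange_len (r0 :: rest) ""
    (fun acc rowS =>
      ((PySem.List.pyRange 0 (r0.toList.length : Int)).foldl
        (fun acc2 j => acc2 ++ [PySem.Chars.lower [PySem.List.pyGetD rowS.toList j ' ']]) acc)
      ++ [[' ']]) []]
  rw [PySem.List.foldl_congr_mem (r0 :: rest)
    (fun acc rowS =>
      ((PySem.List.pyRange 0 (r0.toList.length : Int)).foldl
        (fun acc2 j => acc2 ++ [PySem.Chars.lower [PySem.List.pyGetD rowS.toList j ' ']]) acc)
      ++ [[' ']])
    (fun acc row => acc ++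
      (((row.toList.take r0.toList.length).map (fun c => [PySem.Chars.lowerChar c])) ++ [[' ']]))
    []
    (fun acc row hrow => rowA r0.toList.length row (hpre row hrow) acc)]
  simp only [PySem.List.foldl_append_eq_flatMap, List.nil_append]
  rw [concatA_eq, flatten_flatMap]
  have hfl : ∀ row : String,
      ((((row.toList.take r0.toList.length).map (fun c => [PySem.Chars.lowerChar c])) ++ [[' ']]) : List (List Char)).flatten
        = ((row.toList.take r0.toList.length).map PySem.Chars.lowerChar) ++ [' '] := by
    intro row
    rw [List.flatten_append, flatten_map_singleton]
    rfl
  simp only [hfl]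
  rw [split_flatMap (fun row : String => List.map PySem.Chars.lowerChar (List.take r0.toList.length row.toList)) (r0 :: rest)]
  rw [checkA_eq]
  rw [List.nil_append]

-- ===== B-side lemmas =====

-- count of w among the substrings collected at one position k of token t
theorem count_pos (t w : List Char) (LS : List Int) (WS : List (List Char)) (k : Nat)
    (hW : w ∈ WS) (hcnt : LS.count ((w.length : Nat) : Int) = 1) :
    ((LS.filter (fun L => decide (((PySem.List.slice t (some (k : Int)) (some ((k : Int) + L))).length : Int) = L ∧ PySem.Set.contains WS (PySem.List.slice t (some (k : Int)) (some ((k : Int) + L)))))).map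
        (fun L => PySem.List.slice t (some (k : Int)) (some ((k : Int) + L)))).count w
      = if w <+: t.drop k then 1 else 0 := by
  rw [List.count_eq_countP, List.countP_map, List.countP_filter]
  by_cases hpre : w <+: t.drop k
  · rw [if_pos hpre]
    rw [← hcnt, List.count_eq_countP]
    apply List.countP_congr
    intro L _
    simp only [Function.comp_apply, Bool.and_eq_true, decide_eq_true_eq, beq_iff_eq]
    constructor
    · rintro ⟨hsub, hlen, _⟩
      rw [hsub] at hlen
      exact hlen.symm
    · intro hL
      subst hL
      rw [PySem.List.slice_natCast_add]
      have hsub : (t.drop k).take w.length = w := (List.prefix_iff_eq_take.mp hpre).symm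
      rw [hsub]
      refine ⟨rfl, rfl, ?_⟩
      rw [PySem.Set.contains_iff]
      exact hW
  · rw [if_neg hpre, List.countP_eq_zero]
    intro L _
    simp only [Function.comp_apply, Bool.and_eq_true, decide_eq_true_eq, beq_iff_eq, not_and]
    intro hsub hlen
    exfalso
    rw [hsub] at hlen
    have hL : L = ((w.length : Nat) : Int) := hlen.symm
    subst hL
    rw [PySem.List.slice_natCast_add] at hsub
    exact hpre (List.prefix_iff_eq_take.mpr hsub.symm)

theorem count_flatMap_eq_sum {α β : Type} [BEq β] (g : α → List β) (w : β) (l : List α) :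
    (l.flatMap g).count w = (l.map (fun x => (g x).count w)).sum := by
  induction l with
  | nil => rfl
  | cons x rest ih => rw [List.flatMap_cons, List.count_append, List.map_cons, List.sum_cons, ih]

-- count of w among the substrings collected over all positions of one token = nc
theorem count_token (t w : List Char) (LS : List Int) (WS : List (List Char))
    (hW : w ∈ WS) (hcnt : LS.count ((w.length : Nat) : Int) = 1) :
    (((List.range (t.length + 1)).flatMap (fun (k : Nat) =>
        (LS.filter (fun L => decide (((PySem.List.slice t (some (k : Int)) (some ((k : Int) + L))).length : Int) = L ∧ PySem.Set.contains WS (PySem.List.slice t (some (k : Int)) (some ((k : Int) + L)))))).map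
          (fun L => PySem.List.slice t (some (k : Int)) (some ((k : Int) + L)))))).count w
      = nc t w 0 := by
  rw [count_flatMap_eq_sum]
  have h1 : ∀ k ∈ List.range (t.length + 1),
      ((LS.filter (fun L => decide (((PySem.List.slice t (some (k : Int)) (some ((k : Int) + L))).length : Int) = L ∧ PySem.Set.contains WS (PySem.List.slice t (some (k : Int)) (some ((k : Int) + L)))))).map
        (fun L => PySem.List.slice t (some (k : Int)) (some ((k : Int) + L)))).count w
      = if decide (w <+: t.drop k) = true then 1 else 0 := by
    intro k _
    rw [count_pos t w LS WS k hW hcnt]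
    by_cases h : w <+: t.drop k <;> simp [h]
  rw [List.map_congr_left h1, PySem.List.sum_map_ite_one_zero_nat]
  unfold nc
  apply List.countP_congr
  intro p _
  simp

-- the inner two loops of B's sweep, flattened
theorem sweep_token (t : List Char) (LS : List Int) (WS : List (List Char)) (ms : List (List Char)) :
    (PySem.List.pyRange 0 ((t.length : Int) + 1)).foldl (fun ms2 i =>
        LS.foldl (fun ms3 L =>
          let sub := PySem.List.slice t (some i) (some (i + L))
          if ((sub.length : Int) = L ∧ PySem.Set.contains WS sub) then ms3 ++ [sub] else ms3)
          ms2) ms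
      = ms ++ (List.range (t.length + 1)).flatMap (fun (k : Nat) =>
          (LS.filter (fun L => decide (((PySem.List.slice t (some (k : Int)) (some ((k : Int) + L))).length : Int) = L ∧ PySem.Set.contains WS (PySem.List.slice t (some (k : Int)) (some ((k : Int) + L)))))).map
            (fun L => PySem.List.slice t (some (k : Int)) (some ((k : Int) + L)))) := by
  have h1 : ((t.length : Int) + 1) = ((t.length + 1 : Nat) : Int) := by push_cast; ring
  rw [h1, PySem.List.pyRange_zero_natCast, List.foldl_map]
  have hstep : ∀ (ms2 : List (List Char)) (k : Nat),
      LS.foldl (fun ms3 L =>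
        let sub := PySem.List.slice t (some (k : Int)) (some ((k : Int) + L))
        if ((sub.length : Int) = L ∧ PySem.Set.contains WS sub) then ms3 ++ [sub] else ms3) ms2
      = ms2 ++ (LS.filter (fun L => decide (((PySem.List.slice t (some (k : Int)) (some ((k : Int) + L))).length : Int) = L ∧ PySem.Set.contains WS (PySem.List.slice t (some (k : Int)) (some ((k : Int) + L)))))).map
          (fun L => PySem.List.slice t (some (k : Int)) (some ((k : Int) + L))) := by
    intro ms2 k
    exact PySem.List.foldl_append_ite
      (fun L => (((PySem.List.slice t (some (k : Int)) (some ((k : Int) + L))).length : Int) = L ∧ PySem.Set.contains WS (PySem.List.slice t (some (k : Int)) (some ((k : Int) + L)))))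
      (fun L => PySem.List.slice t (some (k : Int)) (some ((k : Int) + L))) LS ms2
  simp only [hstep]
  rw [PySem.List.foldl_append_eq_flatMap]

-- the word-length list is duplicate-free and contains each word's length
theorem lengths_count_one (words : List String) (w : String) (hw : w ∈ words) :
    (PySem.List.sorted (PySem.Set.ofList (words.map (fun w => ((w.toList.length : Nat) : Int)))) (fun x => x) false).count ((w.toList.length : Nat) : Int) = 1 := by
  have hperm := PySem.List.sorted_perm (PySem.Set.ofList (words.map (fun w => ((w.toList.length : Nat) : Int)))) (fun x : Int => x) false
  rw [hperm.count_eq]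
  have hnd : (PySem.Set.ofList (words.map (fun w => ((w.toList.length : Nat) : Int)))).Nodup :=
    PySem.Set.nodup_ofList _
  have hmem : ((w.toList.length : Nat) : Int) ∈ PySem.Set.ofList (words.map (fun w => ((w.toList.length : Nat) : Int))) := by
    rw [PySem.Set.mem_ofList]
    exact List.mem_map_of_mem hw
  rw [List.count_eq_one_of_mem hnd hmem]

-- final comprehension: [w for _ in range(n)] is replicate
theorem range_map_const (n : Nat) (w : String) :
    (PySem.List.pyRange 0 ((n : Nat) : Int)).map (fun _ => w) = List.replicate n w := by
  rw [PySem.List.pyRange_zero_natCast, List.map_map]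
  simp [Function.comp_def, List.map_const']

theorem altB (r0 : String) (rest words : List String) :
    r_direction_alt (r0 :: rest) words =
      words.flatMap (fun w => List.replicate
        ((((r0 :: rest).flatMap (fun row =>
            PySem.Chars.split₀ ((row.toList.take r0.toList.length).map PySem.Chars.lowerChar))).map
          (fun t => nc t w.toList 0)).sum) w) := by
  simp only [r_direction_alt]
  rw [if_neg (by simp)]
  have hw : PySem.List.pyGetD (r0 :: rest) 0 "" = r0 := by
    simp [PySem.List.pyGetD_ofNat']
  rw [hw]
  have hsl : ∀ xs : List Char,
      PySem.List.slice xs none (some ((r0.toList.length : Nat) : Int)) = xs.take r0.toList.length := by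
    intro xs
    rw [PySem.List.slice_to xs (by positivity)]
    simp
  simp only [hsl, PySem.Chars.lower, PySem.List.foldl_append_eq_flatMap, List.nil_append]
  set toks := (r0 :: rest).flatMap (fun row =>
    PySem.Chars.split₀ ((row.toList.take r0.toList.length).map PySem.Chars.lowerChar)) with htoks
  simp only [sweep_token, PySem.List.foldl_append_eq_flatMap, List.nil_append]
  apply List.flatMap_congr
  intro w hwmem
  rw [count_flatMap_eq_sum]
  have hcount : ∀ t ∈ toks,
      (((List.range (t.length + 1)).flatMap (fun (k : Nat) =>
        ((PySem.List.sorted (PySem.Set.ofList (words.map (fun w => ((w.toList.length : Nat) : Int)))) (fun x => x) false).filter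
            (fun L => decide (((PySem.List.slice t (some (k : Int)) (some ((k : Int) + L))).length : Int) = L ∧ PySem.Set.contains (PySem.Set.ofList (words.map String.toList)) (PySem.List.slice t (some (k : Int)) (some ((k : Int) + L)))))).map
          (fun L => PySem.List.slice t (some (k : Int)) (some ((k : Int) + L)))))).count w.toList
      = nc t w.toList 0 := by
    intro t _
    apply count_token
    · rw [PySem.Set.mem_ofList]
      exact List.mem_map_of_mem hwmem
    · exact lengths_count_one words w hwmem
  rw [List.map_congr_left hcount, range_map_const]

-- ===== VERDICT (by name: the statement is the Claim_ definition above) =====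
theorem r_direction_spec : Claim_equal_r_direction := by
  intro matrix words _hdom hpre
  unfold Spec_r_direction
  cases matrix with
  | nil =>
    show r_direction [] words = r_direction_alt [] words
    have hB : r_direction_alt [] words = [] := by
      simp only [r_direction_alt]
      simp
    rw [hB]
    simp only [r_direction]
    have h0 : PySem.List.pyRange 0 ((List.length ([] : List String)) : Int) = [] := by
      have := PySem.List.pyRange_zero_natCast 0
      simpa using this
    rw [h0, List.foldl_nil, concatA_eq]
    rw [show PySem.Chars.split₀ ([] : List (List Char)).flatten = [] from rfl]
    rw [checkA_eq]
    simp
  | cons r0 rest =>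
    have hpre' : ∀ row ∈ r0 :: rest, r0.toList.length ≤ row.toList.length := by
      intro row hrow
      have := hpre row hrow
      simpa using this
    rw [mainA r0 rest words hpre', altB]
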